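-- pv_equiv track=rewrite | github.com/RadomirSz/T19 | Informatyka/klasa 3/lekcja6/zadanie7.py | first_even_number
-- ===== SOURCE A (Python) =====
-- def first_even_number(T):
--     lewy = 0
--     prawy = len(T)
--     while lewy<prawy:
--         srodek = (lewy + prawy)//2
--         if T[srodek] % 2 == 0:
--             prawy = srodek
--         else:
--             lewy = srodek+1
--         # if T[srodek] %2==0 and T[srodek-1]%2==1 and srodek > 2:
--         #     return T[srodek]
--     return T[lewy]
-- ===== SOURCE B (Python) =====
-- def first_even_number(T):
--     def go(V, w):
--         if w == 0:
--             return V[0]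
--         m = w // 2
--         if V[m] % 2 == 0:
--             return go(V, m)
--         return go(V[m + 1:], w - m - 1)
--     return go(T, len(T))
-- ===== Notes on version B (the rewrite author's own statement) =====
-- stated objective: alternative
-- what changed: A's iterative two-index (lewy, prawy) while-loop is replaced by a recursive helper over a (suffix list, window width) pair that shrinks the list itself by slicing, with no index arithmetic into the original array.
import Mathlib
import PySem

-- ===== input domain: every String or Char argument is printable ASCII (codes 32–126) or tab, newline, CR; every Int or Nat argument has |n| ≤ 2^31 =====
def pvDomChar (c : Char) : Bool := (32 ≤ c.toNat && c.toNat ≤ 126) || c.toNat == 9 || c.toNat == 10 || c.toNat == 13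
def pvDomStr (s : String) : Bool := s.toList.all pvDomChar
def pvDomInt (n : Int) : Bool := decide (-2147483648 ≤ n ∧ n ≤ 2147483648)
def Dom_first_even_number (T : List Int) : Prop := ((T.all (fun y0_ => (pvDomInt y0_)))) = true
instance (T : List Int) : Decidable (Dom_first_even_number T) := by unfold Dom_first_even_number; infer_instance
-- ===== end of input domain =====

-- B replaces A's iterative two-index binary search by a recursive helper over a
-- (suffix list, window width) pair that shrinks the list itself; same values, no speed claim.

-- ===== PORT A =====
-- the while loop of A: state (lewy, prawy); the indexed accesses T[srodek] / T[lewy]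
-- are ported with pyGetD (default never observed inside Pre_, where Python does not raise)
def firstEvenLoopA (T : List Int) (lewy prawy : Nat) : Int :=
  if _h : lewy < prawy then
    let srodek := (lewy + prawy) / 2
    if PySem.Int.mod (PySem.List.pyGetD T (srodek : Int) 0) 2 == 0 then
      firstEvenLoopA T lewy srodek
    else
      firstEvenLoopA T (srodek + 1) prawy
  else
    PySem.List.pyGetD T (lewy : Int) 0
termination_by prawy - lewy
decreasing_by all_goals omega

def first_even_number (T : List Int) : Int :=
  firstEvenLoopA T 0 T.length

-- ===== PORT B =====
-- Source B's inner go(V, w): recursion on the window width w over the current suffix V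
def firstEvenGoB (V : List Int) (w : Nat) : Int :=
  if w = 0 then
    PySem.List.pyGetD V 0 0
  else
    let m := w / 2
    if PySem.Int.mod (PySem.List.pyGetD V (m : Int) 0) 2 == 0 then
      firstEvenGoB V m
    else
      firstEvenGoB (PySem.List.slice V (some ((m : Int) + 1)) none) (w - m - 1)
termination_by w
decreasing_by all_goals omega

def first_even_number_alt (T : List Int) : Int :=
  firstEvenGoB T T.length

-- ===== PRECONDITION & SPEC =====
-- Pre_ excludes exactly the inputs on which Python A raises IndexError (final T[lewy] with
-- lewy = len(T)): those where every element at a "right-spine" probe index — the indices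
-- n - (⌈n/2⌉ >> k), determined by the length alone — is odd (including the empty list).
def Pre_first_even_number (T : List Int) : Prop :=
  T ≠ [] ∧ ∃ k < 64, 0 < (T.length - T.length / 2) >>> k ∧
    PySem.Int.mod (T.getD (T.length - (T.length - T.length / 2) >>> k) 0) 2 = 0
instance (T : List Int) : Decidable (Pre_first_even_number T) := by
  unfold Pre_first_even_number; infer_instance

def pvWitness_first_even_number : List Int := ([1, 2])

def Spec_first_even_number (T : List Int) (out : Int) : Prop := out = first_even_number_alt T
instance (T : List Int) (out : Int) : Decidable (Spec_first_even_number T out) := by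
  unfold Spec_first_even_number; infer_instance

-- ===== CLAIM (what is proved, stated in full; the proofs are below) =====
def Claim_equal_first_even_number : Prop := ∀ (T : List Int), Dom_first_even_number T → Pre_first_even_number T → Spec_first_even_number T (first_even_number T)

-- ===== LEMMAS AND PROOFS =====

theorem pyGetD_drop (T : List Int) (l m : Nat) :
    PySem.List.pyGetD (T.drop l) (m : Int) 0 = PySem.List.pyGetD T ((l + m : Nat) : Int) 0 := by
  rw [PySem.List.pyGetD_natCast, PySem.List.pyGetD_natCast]
  simp [List.getD, List.getElem?_drop]

-- A's loop on the interval [l, r) equals B's recursion on (T.drop l, r - l)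
theorem loopA_eq_goB (T : List Int) (k : Nat) :
    ∀ l r : Nat, r - l ≤ k → firstEvenLoopA T l r = firstEvenGoB (T.drop l) (r - l) := by
  induction k with
  | zero =>
    intro l r h
    unfold firstEvenLoopA firstEvenGoB
    simp only [show ¬ l < r by omega, show r - l = 0 by omega, dif_neg, not_false_eq_true,
      if_pos]
    rw [PySem.List.pyGetD_zero, PySem.List.pyGetD_natCast]
    simp [List.getD, List.getElem?_drop]
  | succ k ih =>
    intro l r h
    by_cases hlr : l < r
    · rw [firstEvenLoopA, firstEvenGoB]
      simp only [dif_pos hlr, if_neg (show ¬ r - l = 0 by omega)]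
      have hmid : ((l + r) / 2 : Nat) = l + (r - l) / 2 := by omega
      have helem : PySem.List.pyGetD (T.drop l) (((r - l) / 2 : Nat) : Int) 0
          = PySem.List.pyGetD T (((l + r) / 2 : Nat) : Int) 0 := by
        rw [pyGetD_drop]
        congr 1
        omega
      rw [helem]
      by_cases hc : PySem.Int.mod (PySem.List.pyGetD T (((l + r) / 2 : Nat) : Int) 0) 2 == 0
      · simp only [hc, if_pos]
        have := ih l ((l + r) / 2) (by omega)
        rw [this, show (l + r) / 2 - l = (r - l) / 2 by omega]
      · simp only [hc, if_neg, Bool.false_eq_true, not_false_eq_true]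
        have hdrop : PySem.List.slice (T.drop l) (some ((((r - l) / 2 : Nat) : Int) + 1)) none
            = T.drop ((l + r) / 2 + 1) := by
          rw [show ((((r - l) / 2 : Nat) : Int) + 1) = (((r - l) / 2 + 1 : Nat) : Int) by push_cast; ring,
            PySem.List.slice_from_natCast, List.drop_drop]
          congr 1
          omega
        rw [hdrop, ih ((l + r) / 2 + 1) r (by omega)]
        congr 1
        omega
    · unfold firstEvenLoopA firstEvenGoB
      simp only [dif_neg hlr, if_pos (show r - l = 0 by omega)]
      rw [PySem.List.pyGetD_zero, PySem.List.pyGetD_natCast]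
      simp [List.getD, List.getElem?_drop]

theorem ports_agree (T : List Int) : first_even_number T = first_even_number_alt T := by
  unfold first_even_number first_even_number_alt
  have := loopA_eq_goB T T.length 0 T.length (by omega)
  simpa using this

-- ===== VERDICT (by name: the statement is the Claim_ definition above) =====
theorem first_even_number_spec : Claim_equal_first_even_number := by
  intro T _ _
  unfold Spec_first_even_number
  exact ports_agree T
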